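-- pv_equiv track=rewrite | github.com/DevXDividends/K-Map-visualiser | backend/app.py | find_minterm_coords
-- ===== SOURCE A (Python) =====
-- KMAP_INDICES_4V = [
--     [0, 1, 3, 2],
--     [4, 5, 7, 6],
--     [12, 13, 15, 14],
--     [8, 9, 11, 10]
-- ]
--
-- KMAP_INDICES_3V = [
--     [0, 1, 3, 2],
--     [4, 5, 7, 6],
-- ]
--
-- KMAP_INDICES_2V = [
--     [0, 1],
--     [2, 3],
-- ]
--
-- def find_minterm_coords(m_index, num_vars):
--     """Finds the (row_index, col_index) of a minterm in the K-Map grid."""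
--     if num_vars == 4:
--         grid = KMAP_INDICES_4V
--     elif num_vars == 3:
--         grid = KMAP_INDICES_3V
--     elif num_vars == 2:
--         grid = KMAP_INDICES_2V
--     else:
--         return None
--
--     for r, row in enumerate(grid):
--         try:
--             c = row.index(m_index)
--             return r, c
--         except ValueError:
--             continue
--     return None
-- ===== SOURCE B (Python) =====
-- GRAY_INV = {0: 0, 1: 1, 3: 2, 2: 3}
--
-- def find_minterm_coords(m_index, num_vars):
--     """Closed-form: inverse-Gray-code the row/col instead of scanning the grid."""
--     if num_vars == 4:
--         if 0 <= m_index < 16: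
--             return GRAY_INV[m_index // 4], GRAY_INV[m_index % 4]
--         return None
--     if num_vars == 3:
--         if 0 <= m_index < 8:
--             return GRAY_INV[m_index // 4], GRAY_INV[m_index % 4]
--         return None
--     if num_vars == 2:
--         if 0 <= m_index < 4:
--             return m_index // 2, m_index % 2
--         return None
--     return None
-- ===== Notes on version B (the rewrite author's own statement) =====
-- stated objective: faster
-- what changed: Replaces the row-by-row scan of the K-map grid (enumerate + list.index) with a closed-form inverse-Gray-code formula computing row and column directly from m_index via // and %.
import Mathlib
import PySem

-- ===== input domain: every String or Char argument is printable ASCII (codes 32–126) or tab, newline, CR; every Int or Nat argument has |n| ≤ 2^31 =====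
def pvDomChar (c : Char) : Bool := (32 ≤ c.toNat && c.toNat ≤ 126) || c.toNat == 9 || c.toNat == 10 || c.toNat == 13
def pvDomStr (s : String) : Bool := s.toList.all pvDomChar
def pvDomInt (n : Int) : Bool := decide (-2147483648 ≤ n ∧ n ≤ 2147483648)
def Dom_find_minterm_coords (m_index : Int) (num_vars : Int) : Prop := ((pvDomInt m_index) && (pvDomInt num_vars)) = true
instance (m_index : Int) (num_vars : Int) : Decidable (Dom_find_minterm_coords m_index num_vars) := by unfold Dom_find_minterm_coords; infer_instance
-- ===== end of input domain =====

-- B replaces A's row-by-row grid scan with a closed-form inverse-Gray-code formula (objective: faster, O(1) vs grid scan).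

-- ===== PORT A =====
def KMAP_INDICES_4V : List (List Int) := [[0, 1, 3, 2], [4, 5, 7, 6], [12, 13, 15, 14], [8, 9, 11, 10]]
def KMAP_INDICES_3V : List (List Int) := [[0, 1, 3, 2], [4, 5, 7, 6]]
def KMAP_INDICES_2V : List (List Int) := [[0, 1], [2, 3]]

-- the 'for r, row in enumerate(grid): try c = row.index(m_index) …' loop
def fmcScan (rows : List (List Int)) (r : Int) (m_index : Int) : Option (Int × Int) :=
  match rows with
  | [] => none
  | row :: rest =>
    match PySem.List.index? row m_index with
    | some c => some (r, (c : Int))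
    | none => fmcScan rest (r + 1) m_index

def find_minterm_coords (m_index : Int) (num_vars : Int) : Option (Int × Int) :=
  if num_vars = 4 then fmcScan KMAP_INDICES_4V 0 m_index
  else if num_vars = 3 then fmcScan KMAP_INDICES_3V 0 m_index
  else if num_vars = 2 then fmcScan KMAP_INDICES_2V 0 m_index
  else none

-- ===== PORT B =====
def GRAY_INV : PySem.Dict Int Int := PySem.Dict.ofList [(0, 0), (1, 1), (3, 2), (2, 3)]

def find_minterm_coords_alt (m_index : Int) (num_vars : Int) : Option (Int × Int) :=
  if num_vars = 4 then
    if 0 ≤ m_index ∧ m_index < 16 then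
      some ((GRAY_INV.get? (PySem.Int.floordiv m_index 4)).getD 0,
            (GRAY_INV.get? (PySem.Int.mod m_index 4)).getD 0)
    else none
  else if num_vars = 3 then
    if 0 ≤ m_index ∧ m_index < 8 then
      some ((GRAY_INV.get? (PySem.Int.floordiv m_index 4)).getD 0,
            (GRAY_INV.get? (PySem.Int.mod m_index 4)).getD 0)
    else none
  else if num_vars = 2 then
    if 0 ≤ m_index ∧ m_index < 4 then
      some (PySem.Int.floordiv m_index 2, PySem.Int.mod m_index 2)
    else none
  else none

-- ===== PRECONDITION & SPEC =====
def Spec_find_minterm_coords (m_index : Int) (num_vars : Int) (out : Option (Int × Int)) : Prop := out = find_minterm_coords_alt m_index num_vars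
instance (m_index : Int) (num_vars : Int) (out : Option (Int × Int)) : Decidable (Spec_find_minterm_coords m_index num_vars out) := by unfold Spec_find_minterm_coords; infer_instance

-- ===== CLAIM (what is proved, stated in full; the proofs are below) =====
def Claim_equal_find_minterm_coords : Prop := ∀ (m_index : Int) (num_vars : Int), Dom_find_minterm_coords m_index num_vars → Spec_find_minterm_coords m_index num_vars (find_minterm_coords m_index num_vars)

-- ===== LEMMAS AND PROOFS =====

-- on a fixed grid, both sides agree for every m_index (in range: finite case check; out of range: both none)
theorem fmc_grid_eq (m_index num_vars : Int) :
    find_minterm_coords m_index num_vars = find_minterm_coords_alt m_index num_vars := by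
  have key : ∀ lo hi : Int, lo ≤ hi →
      (∀ m : Int, lo ≤ m → m < hi →
        find_minterm_coords m num_vars = find_minterm_coords_alt m num_vars) →
      (∀ m : Int, (m < lo ∨ hi ≤ m) →
        find_minterm_coords m num_vars = find_minterm_coords_alt m num_vars) →
      find_minterm_coords m_index num_vars = find_minterm_coords_alt m_index num_vars := by
    intro lo hi _ hin hout
    by_cases h : lo ≤ m_index ∧ m_index < hi
    · exact hin m_index h.1 h.2
    · exact hout m_index (by omega)
  by_cases h4 : num_vars = 4
  · subst h4
    refine key 0 16 (by omega) ?_ ?_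
    · intro m h1 h2; interval_cases m <;> rfl
    · intro m hm
      have hne : ∀ x ∈ [(0:Int),1,3,2,4,5,7,6,12,13,15,14,8,9,11,10], m ≠ x := by
        intro x hx; fin_cases hx <;> omega
      simp only [find_minterm_coords, find_minterm_coords_alt]
      norm_num
      rw [if_neg (by omega)]
      simp only [KMAP_INDICES_4V, fmcScan]
      rw [show PySem.List.index? [(0:Int),1,3,2] m = none from
            (PySem.List.index?_eq_none_iff _ _).mpr (by simp; omega),
          show PySem.List.index? [(4:Int),5,7,6] m = none from
            (PySem.List.index?_eq_none_iff _ _).mpr (by simp; omega),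
          show PySem.List.index? [(12:Int),13,15,14] m = none from
            (PySem.List.index?_eq_none_iff _ _).mpr (by simp; omega),
          show PySem.List.index? [(8:Int),9,11,10] m = none from
            (PySem.List.index?_eq_none_iff _ _).mpr (by simp; omega)]
  by_cases h3 : num_vars = 3
  · subst h3
    refine key 0 8 (by omega) ?_ ?_
    · intro m h1 h2; interval_cases m <;> rfl
    · intro m hm
      simp only [find_minterm_coords, find_minterm_coords_alt]
      norm_num
      rw [if_neg (by omega)]
      simp only [KMAP_INDICES_3V, fmcScan]
      rw [show PySem.List.index? [(0:Int),1,3,2] m = none from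
            (PySem.List.index?_eq_none_iff _ _).mpr (by simp; omega),
          show PySem.List.index? [(4:Int),5,7,6] m = none from
            (PySem.List.index?_eq_none_iff _ _).mpr (by simp; omega)]
  by_cases h2 : num_vars = 2
  · subst h2
    refine key 0 4 (by omega) ?_ ?_
    · intro m hm1 hm2; interval_cases m <;> rfl
    · intro m hm
      simp only [find_minterm_coords, find_minterm_coords_alt]
      norm_num
      rw [if_neg (by omega)]
      simp only [KMAP_INDICES_2V, fmcScan]
      rw [show PySem.List.index? [(0:Int),1] m = none from
            (PySem.List.index?_eq_none_iff _ _).mpr (by simp; omega),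
          show PySem.List.index? [(2:Int),3] m = none from
            (PySem.List.index?_eq_none_iff _ _).mpr (by simp; omega)]
  · simp [find_minterm_coords, find_minterm_coords_alt, h4, h3, h2]

-- ===== VERDICT (by name: the statement is the Claim_ definition above) =====
theorem find_minterm_coords_spec : Claim_equal_find_minterm_coords := by
  intro m nv _
  exact fmc_grid_eq m nv
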